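-- pv_equiv track=rewrite | github.com/Asnor14/grammar-spellchecker-ngram | backend/app/models/semantic_checker.py | _get_verb_object_pairs
-- ===== SOURCE A (Python) =====
-- from typing import List, Dict, Tuple, Optional
--
-- def _get_verb_object_pairs(tagged: List[Tuple[str, str]]) -> List[Tuple[str, str, int, int]]:
--     """
--     Extract verb-object pairs from tagged sentence.
--     Returns: List of (verb, object, verb_idx, object_idx)
--     """
--     pairs = []
--     verb_tags = {'VB', 'VBD', 'VBG', 'VBN', 'VBP', 'VBZ'}
--     noun_tags = {'NN', 'NNS', 'NNP', 'NNPS'}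
--
--     for i, (word, tag) in enumerate(tagged):
--         if tag in verb_tags:
--             # Look for noun after verb (within next 3 words)
--             for j in range(i + 1, min(i + 4, len(tagged))):
--                 next_word, next_tag = tagged[j]
--                 if next_tag in noun_tags:
--                     pairs.append((word.lower(), next_word.lower(), i, j))
--                     break
--                 # Skip determiners, adjectives
--                 elif next_tag not in {'DT', 'JJ', 'JJR', 'JJS', 'RB', 'RBR', 'RBS'}:
--                     break
--
--     return pairs
-- ===== SOURCE B (Python) =====
-- from typing import List, Tuple
--
-- def _get_verb_object_pairs(tagged: List[Tuple[str, str]]) -> List[Tuple[str, str, int, int]]: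
--     """Single linear pass: carry at most one pending verb instead of a nested lookahead scan."""
--     verb_tags = {'VB', 'VBD', 'VBG', 'VBN', 'VBP', 'VBZ'}
--     noun_tags = {'NN', 'NNS', 'NNP', 'NNPS'}
--     skip_tags = {'DT', 'JJ', 'JJR', 'JJS', 'RB', 'RBR', 'RBS'}
--     pairs = []
--     pending = None  # (lowercased verb, its index) or None
--     for k, (word, tag) in enumerate(tagged):
--         if pending is not None and k - pending[1] > 3:
--             pending = None
--         if tag in noun_tags:
--             if pending is not None:
--                 pairs.append((pending[0], word.lower(), pending[1], k))
--             pending = None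
--         elif tag in verb_tags:
--             pending = (word.lower(), k)
--         elif tag not in skip_tags:
--             pending = None
--     return pairs
-- ===== Notes on version B (the rewrite author's own statement) =====
-- stated objective: alternative
-- what changed: Replaced A's nested lookahead (for each verb, an inner indexed scan of the next 3 tokens) by a single linear pass that carries at most one pending verb (lowercased word, index) and emits a pair when a noun arrives within the 3-token window.
import Mathlib
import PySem

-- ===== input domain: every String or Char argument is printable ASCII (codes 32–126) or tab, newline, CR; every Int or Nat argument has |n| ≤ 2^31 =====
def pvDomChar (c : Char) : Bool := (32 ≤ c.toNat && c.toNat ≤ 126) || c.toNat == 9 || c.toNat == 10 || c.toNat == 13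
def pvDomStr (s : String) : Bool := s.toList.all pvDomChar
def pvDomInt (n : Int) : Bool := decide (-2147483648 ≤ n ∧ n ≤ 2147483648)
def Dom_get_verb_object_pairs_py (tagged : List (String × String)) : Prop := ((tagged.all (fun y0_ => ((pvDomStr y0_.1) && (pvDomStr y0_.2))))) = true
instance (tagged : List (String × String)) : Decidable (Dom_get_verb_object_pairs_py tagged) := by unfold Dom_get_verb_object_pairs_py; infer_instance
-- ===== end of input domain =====

-- B replaces A's nested lookahead scan by one linear pass carrying a single pending verb (alternative decomposition, same result).


-- ===== PORT A =====
def pvVerbTags : List String := ["VB","VBD","VBG","VBN","VBP","VBZ"]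
def pvNounTags : List String := ["NN","NNS","NNP","NNPS"]
def pvSkipTags : List String := ["DT","JJ","JJR","JJS","RB","RBR","RBS"]

-- inner lookahead loop of A (`for j in range(i+1, min(i+4, len(tagged)))` with break);
-- `pyGet? = none` (IndexError) is unreachable since every j of the range is in bounds.
def pvInnerA (tagged : List (String × String)) (word : String) (i : Int) :
    List Int → Option (String × String × Int × Int)
  | [] => none
  | j :: js =>
    match PySem.List.pyGet? tagged j with
    | none => none
    | some (nw, nt) =>
      if pvNounTags.contains nt then some (PySem.Str.lower word, PySem.Str.lower nw, i, j)
      else if pvSkipTags.contains nt then pvInnerA tagged word i js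
      else none

-- body of A's outer `for i, (word, tag) in enumerate(tagged)` loop
def pvStepA (tagged : List (String × String)) (pairs : List (String × String × Int × Int))
    (p : Int × String × String) : List (String × String × Int × Int) :=
  if pvVerbTags.contains p.2.2 then
    match pvInnerA tagged p.2.1 p.1
        (PySem.List.pyRange (p.1 + 1) (min (p.1 + 4) (tagged.length : Int)) 1) with
    | some pr => pairs ++ [pr]
    | none => pairs
  else pairs

def get_verb_object_pairs_py (tagged : List (String × String)) : List (String × String × Int × Int) :=
  (PySem.List.enumerate tagged 0).foldl (pvStepA tagged) []

-- ===== PORT B =====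
-- body of B's single loop: pending = current verb's (lowercased word, index), or none
def pvStepB (st : List (String × String × Int × Int) × Option (String × Int))
    (p : Int × String × String) : List (String × String × Int × Int) × Option (String × Int) :=
  let pending : Option (String × Int) :=
    match st.2 with
    | some vi => if p.1 - vi.2 > 3 then none else some vi
    | none => none
  if pvNounTags.contains p.2.2 then
    match pending with
    | some vi => (st.1 ++ [(vi.1, PySem.Str.lower p.2.1, vi.2, p.1)], none)
    | none => (st.1, none)
  else if pvVerbTags.contains p.2.2 then (st.1, some (PySem.Str.lower p.2.1, p.1))
  else if pvSkipTags.contains p.2.2 then (st.1, pending)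
  else (st.1, none)

def get_verb_object_pairs_py_alt (tagged : List (String × String)) : List (String × String × Int × Int) :=
  ((PySem.List.enumerate tagged 0).foldl pvStepB ([], none)).1

-- ===== PRECONDITION & SPEC =====
-- A is total; no Pre_ needed.
def Spec_get_verb_object_pairs_py (tagged : List (String × String)) (out : List (String × String × Int × Int)) : Prop := out = get_verb_object_pairs_py_alt tagged
instance (tagged : List (String × String)) (out : List (String × String × Int × Int)) : Decidable (Spec_get_verb_object_pairs_py tagged out) := by unfold Spec_get_verb_object_pairs_py; infer_instance

-- ===== CLAIM (what is proved, stated in full; the proofs are below) =====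
def Claim_equal_get_verb_object_pairs_py : Prop := ∀ (tagged : List (String × String)), Dom_get_verb_object_pairs_py tagged → Spec_get_verb_object_pairs_py tagged (get_verb_object_pairs_py tagged)

-- ===== LEMMAS AND PROOFS =====

-- common structural reference semantics: the in-flight scan of one pending verb …
def pvScan (v : String) (i : Int) : Int → List (String × String) → List (String × String × Int × Int)
  | _, [] => []
  | k, (w, t) :: rest =>
    if k - i > 3 then []
    else if pvNounTags.contains t then [(v, PySem.Str.lower w, i, k)]
    else if pvVerbTags.contains t then []
    else if pvSkipTags.contains t then pvScan v i (k + 1) rest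
    else []

-- … and the whole pass from position k on the suffix
def pvArec : Int → List (String × String) → List (String × String × Int × Int)
  | _, [] => []
  | k, (w, t) :: rest =>
    (if pvVerbTags.contains t then pvScan (PySem.Str.lower w) k (k + 1) rest else []) ++
      pvArec (k + 1) rest

theorem pv_noun_not_verb {t : String} (h : t ∈ pvNounTags) : t ∉ pvVerbTags := by
  simp [pvNounTags] at h
  rcases h with h | h | h | h <;> subst h <;> decide

theorem pv_skip_not_verb {t : String} (h : t ∈ pvSkipTags) : t ∉ pvVerbTags := by
  simp [pvSkipTags] at h
  rcases h with h | h | h | h | h | h | h <;> subst h <;> decide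

theorem pv_match_toList (pairs : List (String × String × Int × Int))
    (o : Option (String × String × Int × Int)) :
    (match o with | some pr => pairs ++ [pr] | none => pairs) = pairs ++ o.toList := by
  cases o <;> simp

-- the pyRange/pyGet? lookahead loop of A equals the structural scan of the suffix
theorem pv_innerA_eq (word : String) (i : Int) :
    ∀ (rest' pre' : List (String × String)),
      (pvInnerA (pre' ++ rest') word i
        (PySem.List.pyRange ((pre'.length : Int))
          (min (i + 4) (((pre' ++ rest').length : Int))) 1)).toList
        = pvScan (PySem.Str.lower word) i (pre'.length : Int) rest' := by
  intro rest'
  induction rest' with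
  | nil =>
    intro pre'
    rw [PySem.List.pyRange_one_eq_nil (by simp)]
    simp [pvInnerA, pvScan]
  | cons wt rest2 ih =>
    intro pre'
    obtain ⟨w, t⟩ := wt
    by_cases hwin : ((pre'.length : Int)) - i > 3
    · rw [PySem.List.pyRange_one_eq_nil (by omega)]
      simp [pvInnerA, pvScan, hwin]
    · rw [PySem.List.pyRange_one_cons (by simp; omega)]
      rw [pvInnerA, PySem.List.pyGet?_append_length]
      by_cases hn : t ∈ pvNounTags
      · simp [pvScan, List.contains_eq_mem, hwin, hn]
      · by_cases hs : t ∈ pvSkipTags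
        · have hv := pv_skip_not_verb hs
          simp only [pvScan, List.contains_eq_mem, hwin, hn, hs, hv, decide_true, decide_false,
            Bool.false_eq_true, not_false_eq_true, if_neg, if_pos]
          have := ih (pre' ++ [(w, t)])
          simp only [List.append_assoc, List.cons_append, List.nil_append,
            List.length_append, List.length_cons, List.length_nil] at this ⊢
          rw [show ((pre'.length : Int)) + 1 = (((pre'.length + 1 : Nat)) : Int) by push_cast; ring]
          rw [show (pre'.length + 1 : Nat) = pre'.length + (0 + 1) by omega] at this ⊢
          exact this
        · by_cases hv : t ∈ pvVerbTags <;>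
            simp [pvScan, List.contains_eq_mem, hwin, hn, hs, hv]

-- A's fold over the enumerated suffix computes the structural pass
theorem pv_foldA_eq :
    ∀ (l pre : List (String × String)) (acc : List (String × String × Int × Int)),
      (PySem.List.enumerate l ((pre.length : Int))).foldl (pvStepA (pre ++ l)) acc
        = acc ++ pvArec (pre.length : Int) l := by
  intro l
  induction l with
  | nil => intro pre acc; simp [PySem.List.enumerate_nil, pvArec]
  | cons wt rest ih =>
    intro pre acc
    obtain ⟨w, t⟩ := wt
    rw [PySem.List.enumerate_cons, List.foldl_cons]
    have hsplit : pre ++ (w, t) :: rest = (pre ++ [(w, t)]) ++ rest := by simp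
    have hlen : ((pre ++ [(w, t)]).length : Int) = (pre.length : Int) + 1 := by simp
    have ihr := ih (pre ++ [(w, t)]) (pvStepA (pre ++ (w, t) :: rest) acc ((pre.length : Int), w, t))
    rw [hlen] at ihr
    rw [hsplit] at ihr ⊢
    rw [ihr, ← hsplit]
    simp only [pvArec]
    by_cases hv : t ∈ pvVerbTags
    · simp only [pvStepA, List.contains_eq_mem, hv, decide_true, if_true]
      rw [pv_match_toList]
      have h2 := pv_innerA_eq w (pre.length : Int) rest (pre ++ [(w, t)])
      simp only [List.append_assoc, List.cons_append, List.nil_append, List.length_append,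
        List.length_cons, List.length_nil, Nat.cast_add, Nat.cast_one, Nat.cast_zero] at h2 ⊢
      push_cast at h2 ⊢
      rw [h2]
    · simp [pvStepA, List.contains_eq_mem, hv]

theorem pv_foldB_eq :
    ∀ (l : List (String × String)) (k : Int) (acc : List (String × String × Int × Int))
      (pending : Option (String × Int)),
      ((PySem.List.enumerate l k).foldl pvStepB (acc, pending)).1
        = acc ++ (match pending with
                  | some vi => pvScan vi.1 vi.2 k l
                  | none => []) ++ pvArec k l := by
  intro l
  induction l with
  | nil =>
    intro k acc pending
    cases pending <;> simp [PySem.List.enumerate_nil, pvScan, pvArec]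
  | cons wt rest ih =>
    intro k acc pending
    obtain ⟨w, t⟩ := wt
    rw [PySem.List.enumerate_cons, List.foldl_cons]
    by_cases hn : t ∈ pvNounTags
    · have hnv := pv_noun_not_verb hn
      rcases pending with _ | ⟨v, i⟩
      · simp only [pvStepB, List.contains_eq_mem, hn, decide_true, if_true]
        rw [ih]
        simp [pvArec, List.contains_eq_mem, hnv]
      · by_cases hwin : k - i > 3
        · simp only [pvStepB, List.contains_eq_mem, hn, decide_true, hwin, if_pos]
          rw [ih]
          simp [pvArec, pvScan, List.contains_eq_mem, hnv, hwin]
        · simp only [pvStepB, List.contains_eq_mem, hn, decide_true, if_true, hwin, if_neg,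
            not_false_eq_true]
          rw [ih]
          simp [pvArec, pvScan, List.contains_eq_mem, hn, hnv, hwin]
    · by_cases hv : t ∈ pvVerbTags
      · rcases pending with _ | ⟨v, i⟩
        · simp only [pvStepB, List.contains_eq_mem, hn, hv, decide_true, decide_false,
            Bool.false_eq_true, if_true, if_false]
          rw [ih]
          simp [pvArec, List.contains_eq_mem, hv]
        · by_cases hwin : k - i > 3
          · simp only [pvStepB, List.contains_eq_mem, hn, hv, decide_true, decide_false,
              Bool.false_eq_true, if_false, hwin, if_pos]
            rw [ih]
            simp [pvArec, pvScan, List.contains_eq_mem, hv, hwin]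
          · simp only [pvStepB, List.contains_eq_mem, hn, hv, decide_true, decide_false,
              Bool.false_eq_true, if_true, hwin, if_neg, not_false_eq_true]
            rw [ih]
            simp [pvArec, pvScan, List.contains_eq_mem, hn, hv, hwin]
      · by_cases hs : t ∈ pvSkipTags
        · rcases pending with _ | ⟨v, i⟩
          · simp only [pvStepB, List.contains_eq_mem, hn, hv, hs, decide_true, decide_false,
              Bool.false_eq_true, if_true, if_false]
            rw [ih]
            simp [pvArec, List.contains_eq_mem, hv]
          · by_cases hwin : k - i > 3
            · simp only [pvStepB, List.contains_eq_mem, hn, hv, hs, decide_true, decide_false,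
                Bool.false_eq_true, if_false, hwin, if_pos]
              rw [ih]
              simp [pvArec, pvScan, List.contains_eq_mem, hv, hwin]
            · simp only [pvStepB, List.contains_eq_mem, hn, hv, hs, decide_true, decide_false,
                Bool.false_eq_true, if_true, hwin, if_neg, not_false_eq_true]
              rw [ih]
              simp [pvArec, pvScan, List.contains_eq_mem, hn, hv, hs, hwin]
        · rcases pending with _ | ⟨v, i⟩
          · simp only [pvStepB, List.contains_eq_mem, hn, hv, hs, decide_false,
              Bool.false_eq_true, if_false]
            rw [ih]
            simp [pvArec, List.contains_eq_mem, hv]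
          · by_cases hwin : k - i > 3
            · simp only [pvStepB, List.contains_eq_mem, hn, hv, hs, decide_false,
                Bool.false_eq_true, if_false, hwin, if_pos]
              rw [ih]
              simp [pvArec, pvScan, List.contains_eq_mem, hv, hwin]
            · simp only [pvStepB, List.contains_eq_mem, hn, hv, hs, decide_false,
                Bool.false_eq_true, hwin, if_neg, not_false_eq_true]
              rw [ih]
              simp [pvArec, pvScan, List.contains_eq_mem, hn, hv, hs, hwin]

-- ===== VERDICT (by name: the statement is the Claim_ definition above) =====
theorem get_verb_object_pairs_py_spec : Claim_equal_get_verb_object_pairs_py := by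
  intro tagged _
  unfold Spec_get_verb_object_pairs_py get_verb_object_pairs_py get_verb_object_pairs_py_alt
  have hA := pv_foldA_eq tagged [] []
  have hB := pv_foldB_eq tagged 0 [] none
  simp only [List.length_nil, Nat.cast_zero, List.nil_append] at hA hB
  rw [hA, hB]
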